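-- pv_equiv track=rewrite | github.com/y3-editor/y3-lualib | .codemaker/skills/y3-ui-beautify/pipeline/patch_ui_json.py | suggest_paths
-- ===== SOURCE A (Python) =====
-- from typing import Any, Dict, Optional, List
--
-- def suggest_paths(tree_paths: List[str], query: str, limit: int = 20) -> List[str]:
--     q = query.lower()
--     scored = []
--     for p in tree_paths:
--         pl = p.lower()
--         if q in pl:
--             score = (0 if pl.endswith(q) else 1, len(pl))
--             scored.append((score, p))
--     scored.sort(key=lambda x: x[0])
--     return [p for _, p in scored[:limit]]
-- ===== SOURCE B (Python) =====
-- def suggest_paths(tree_paths, query, limit=20):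
--     q = query.lower()
--     by_len = ({}, {})  # bucket 0: lowercased path ends with q; bucket 1: other matches
--     for p in tree_paths:
--         pl = p.lower()
--         if q in pl:
--             d = by_len[0] if pl.endswith(q) else by_len[1]
--             d.setdefault(len(pl), []).append(p)
--     out = []
--     for d in by_len:
--         for length in sorted(d):
--             out.extend(d[length])
--     return out[:limit]
-- ===== Notes on version B (the rewrite author's own statement) =====
-- stated objective: alternative
-- what changed: Replaces A's comparison sort of all matches by a distribution (bucket) sort: matches are grouped into hash maps keyed by lowercased length (one map for ends-with-query matches, one for the rest), and the output is assembled by walking the sorted distinct lengths of each map, so only distinct lengths are ever compared.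
import Mathlib
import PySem

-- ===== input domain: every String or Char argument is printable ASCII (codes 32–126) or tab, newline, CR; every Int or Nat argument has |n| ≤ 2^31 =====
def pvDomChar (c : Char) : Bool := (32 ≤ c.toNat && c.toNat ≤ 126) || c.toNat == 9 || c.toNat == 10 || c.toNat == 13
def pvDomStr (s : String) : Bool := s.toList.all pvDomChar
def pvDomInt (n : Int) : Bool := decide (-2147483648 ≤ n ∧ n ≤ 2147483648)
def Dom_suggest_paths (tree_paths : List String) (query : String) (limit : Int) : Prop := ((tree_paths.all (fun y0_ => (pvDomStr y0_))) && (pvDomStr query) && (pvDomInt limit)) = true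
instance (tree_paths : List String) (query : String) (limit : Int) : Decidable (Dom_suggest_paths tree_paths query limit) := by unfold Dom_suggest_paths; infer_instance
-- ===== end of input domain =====

-- B replaces A's comparison sort of all matches by a distribution (bucket) sort: matches are
-- grouped into hash maps keyed by lowercased length (one map per ends-with flag) and emitted by
-- walking the sorted distinct lengths; objective: alternative algorithm (same results, only
-- distinct lengths are compared).

-- ===== PORT A =====
def suggest_paths (tree_paths : List String) (query : String) (limit : Int) : List String :=
  let q := PySem.Str.lower query
  let scored : List ((Int × Int) × String) :=
    tree_paths.foldl (fun scored p =>
      let pl := PySem.Str.lower p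
      if PySem.Str.isIn q pl then
        scored ++ [(((if PySem.Str.endswith pl q then (0 : Int) else 1), (PySem.Str.len pl : Int)), p)]
      else scored) []
  let sortedScored := PySem.List.sorted2 scored (fun x => x.1.1) (fun x => x.1.2)
  (PySem.List.slice sortedScored none (some limit)).map (fun x => x.2)

-- ===== PORT B =====
def suggest_paths_alt (tree_paths : List String) (query : String) (limit : Int) : List String :=
  let q := PySem.Str.lower query
  -- by_len = ({}, {}); d.setdefault(len(pl), []).append(p) ported as Dict.modify (d[k] = d.get(k, []) + [p])
  let byLen : PySem.Dict Int (List String) × PySem.Dict Int (List String) :=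
    tree_paths.foldl (fun acc p =>
      let pl := PySem.Str.lower p
      if PySem.Str.isIn q pl then
        if PySem.Str.endswith pl q then
          (acc.1.modify (PySem.Str.len pl : Int) [] (· ++ [p]), acc.2)
        else
          (acc.1, acc.2.modify (PySem.Str.len pl : Int) [] (· ++ [p]))
      else acc) (PySem.Dict.empty, PySem.Dict.empty)
  let out := (PySem.List.sorted byLen.1.keys (fun v => v)).foldl
      (fun out L => out ++ byLen.1.getD L []) []
  let out := (PySem.List.sorted byLen.2.keys (fun v => v)).foldl
      (fun out L => out ++ byLen.2.getD L []) out
  PySem.List.slice out none (some limit)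

-- ===== PRECONDITION & SPEC =====
def Spec_suggest_paths (tree_paths : List String) (query : String) (limit : Int) (out : List String) : Prop := out = suggest_paths_alt tree_paths query limit
instance (tree_paths : List String) (query : String) (limit : Int) (out : List String) : Decidable (Spec_suggest_paths tree_paths query limit out) := by unfold Spec_suggest_paths; infer_instance

-- ===== CLAIM (what is proved, stated in full; the proofs are below) =====
def Claim_equal_suggest_paths : Prop := ∀ (tree_paths : List String) (query : String) (limit : Int), Dom_suggest_paths tree_paths query limit → Spec_suggest_paths tree_paths query limit (suggest_paths tree_paths query limit)

-- ===== LEMMAS AND PROOFS =====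

-- insertBy only compares the inserted element with members of the list
theorem insertBy_congr_left {α : Type} (b1 b2 : α → α → Bool) (x : α) (l : List α)
    (h : ∀ y ∈ l, b1 x y = b2 x y) :
    PySem.List.insertBy b1 x l = PySem.List.insertBy b2 x l := by
  induction l with
  | nil => rfl
  | cons y ys ih =>
    simp only [PySem.List.insertBy]
    rw [h y (by simp)]
    split
    · rfl
    · rw [ih (fun z hz => h z (by simp [hz]))]

-- x skips past a prefix it never goes before
theorem insertBy_append_skip {α : Type} (b : α → α → Bool) (x : α) (l l' : List α)
    (h : ∀ y ∈ l, b x y = false) :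
    PySem.List.insertBy b x (l ++ l') = l ++ PySem.List.insertBy b x l' := by
  induction l with
  | nil => rfl
  | cons y ys ih =>
    simp only [List.cons_append, PySem.List.insertBy, h y (by simp)]
    simp [ih (fun z hz => h z (by simp [hz]))]

-- x stays in the prefix when it goes before everything in the suffix
theorem insertBy_append_left {α : Type} (b : α → α → Bool) (x : α) (l l' : List α)
    (h : ∀ y ∈ l', b x y = true) :
    PySem.List.insertBy b x (l ++ l') = PySem.List.insertBy b x l ++ l' := by
  induction l with
  | nil =>
    cases l' with
    | nil => rfl
    | cons y ys => simp [PySem.List.insertBy, h y (by simp)]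
  | cons y ys ih =>
    simp only [List.cons_append, PySem.List.insertBy]
    split
    · rfl
    · simp [ih]

-- appending one element to the input of a stable sort inserts it
theorem sorted_append_singleton {α κ : Type} [LT κ] [DecidableLT κ] (l : List α) (x : α) (key : α → κ) :
    PySem.List.sorted (l ++ [x]) key = PySem.List.insertBy (fun a b => decide (key a < key b)) x (PySem.List.sorted l key) := by
  rw [PySem.List.sorted_eq_foldl_insertBy, PySem.List.sorted_eq_foldl_insertBy]
  simp [List.foldl_append]

-- a stable sort whose primary key is a 0/1 flag is the two flag buckets sorted by the secondary key
theorem sorted2_bucket {α : Type} (xs : List α) (k1 k2 : α → Int)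
    (h : ∀ x ∈ xs, k1 x = 0 ∨ k1 x = 1) :
    PySem.List.sorted2 xs k1 k2
      = PySem.List.sorted (xs.filter (fun x => k1 x == 0)) k2
        ++ PySem.List.sorted (xs.filter (fun x => !(k1 x == 0))) k2 := by
  induction xs using List.reverseRecOn with
  | nil => simp [PySem.List.sorted2, PySem.List.sorted]
  | append_singleton ys x ih =>
    have hys : ∀ z ∈ ys, k1 z = 0 ∨ k1 z = 1 := fun z hz => h z (by simp [hz])
    have hx := h x (by simp)
    have hstep2 : PySem.List.sorted2 (ys ++ [x]) k1 k2
        = PySem.List.insertBy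
            (fun a b => decide (k1 a < k1 b) || (!decide (k1 b < k1 a) && decide (k2 a < k2 b)))
            x (PySem.List.sorted2 ys k1 k2) := by
      simp [PySem.List.sorted2, List.foldl_append]
    have hmem0 : ∀ y ∈ PySem.List.sorted (ys.filter (fun z => k1 z == 0)) k2, k1 y = 0 := by
      intro y hy
      rw [PySem.List.mem_sorted] at hy
      have := (List.mem_filter.mp hy).2
      simpa using this
    have hmem1 : ∀ y ∈ PySem.List.sorted (ys.filter (fun z => !(k1 z == 0))) k2, k1 y = 1 := by
      intro y hy
      rw [PySem.List.mem_sorted] at hy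
      have hne : ¬ k1 y = 0 := by simpa using (List.mem_filter.mp hy).2
      rcases hys y (List.mem_filter.mp hy).1 with h0 | h1
      · exact absurd h0 hne
      · exact h1
    rw [hstep2, ih hys]
    rcases hx with h0 | h1
    · have hfa : (ys ++ [x]).filter (fun z => k1 z == 0) = ys.filter (fun z => k1 z == 0) ++ [x] := by
        simp [List.filter_append, h0]
      have hfb : (ys ++ [x]).filter (fun z => !(k1 z == 0)) = ys.filter (fun z => !(k1 z == 0)) := by
        simp [List.filter_append, h0]
      rw [hfa, hfb, sorted_append_singleton]
      rw [insertBy_append_left _ x _ _ (fun y hy => by simp [h0, hmem1 y hy])]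
      rw [insertBy_congr_left _ (fun a b => decide (k2 a < k2 b)) x _ (fun y hy => by simp [h0, hmem0 y hy])]
    · have hfa : (ys ++ [x]).filter (fun z => k1 z == 0) = ys.filter (fun z => k1 z == 0) := by
        simp [List.filter_append, h1]
      have hfb : (ys ++ [x]).filter (fun z => !(k1 z == 0)) = ys.filter (fun z => !(k1 z == 0)) ++ [x] := by
        simp [List.filter_append, h1]
      rw [hfa, hfb, sorted_append_singleton]
      rw [insertBy_append_skip _ x _ _ (fun y hy => by simp [h1, hmem0 y hy])]
      rw [insertBy_congr_left _ (fun a b => decide (k2 a < k2 b)) x _ (fun y hy => by simp [h1, hmem1 y hy])]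

-- inserting an element into a key-bucketed concatenation appends it to its own bucket
theorem insertBy_into_buckets {α : Type} (key : α → Int) (x : α) (Ls : List Int) (f : Int → List α)
    (hp : Ls.Pairwise (· < ·)) (hx : key x ∈ Ls) (hf : ∀ L, ∀ p ∈ f L, key p = L) :
    PySem.List.insertBy (fun a b => decide (key a < key b)) x (Ls.flatMap f)
      = Ls.flatMap (fun L => f L ++ if key x = L then [x] else []) := by
  induction Ls with
  | nil => cases hx
  | cons L Ls ih =>
    have hlt : ∀ L' ∈ Ls, L < L' := (List.pairwise_cons.mp hp).1
    simp only [List.flatMap_cons]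
    by_cases hL : key x = L
    · have hrest : Ls.flatMap (fun L' => f L' ++ if key x = L' then [x] else []) = Ls.flatMap f := by
        apply List.flatMap_congr
        intro L' hL'
        have : key x ≠ L' := by rw [hL]; exact ne_of_lt (hlt L' hL')
        simp [this]
      have hfront : PySem.List.insertBy (fun a b => decide (key a < key b)) x (Ls.flatMap f)
          = [x] ++ Ls.flatMap f := by
        have := insertBy_append_left (fun a b => decide (key a < key b)) x [] (Ls.flatMap f)
          (fun y hy => by
            rcases List.mem_flatMap.mp hy with ⟨L', hL', hyL'⟩
            simp [hf L' y hyL', hL, hlt L' hL'])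
        simpa [PySem.List.insertBy] using this
      rw [hrest, if_pos hL, insertBy_append_skip _ x _ _ (fun y hy => by simp [hf L y hy, hL]), hfront]
      simp
    · have hxLs : key x ∈ Ls := by
        rcases List.mem_cons.mp hx with h | h
        · exact absurd h hL
        · exact h
      rw [insertBy_append_skip _ x _ _ (fun y hy => by
        have : ¬ key x < key y := by rw [hf L y hy]; exact not_lt_of_gt (hlt _ hxLs)
        simpa using this)]
      rw [ih (List.pairwise_cons.mp hp).2 hxLs]
      simp [hL]

-- a bucket that contributes nothing may be inserted into the key list freely
theorem flatMap_insertBy_of_empty {α : Type} (b : Int → Int → Bool) (k : Int) (Ls : List Int)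
    (f : Int → List α) (hk : f k = []) :
    (PySem.List.insertBy b k Ls).flatMap f = Ls.flatMap f := by
  induction Ls with
  | nil => simp [PySem.List.insertBy, hk]
  | cons L Ls ih =>
    simp only [PySem.List.insertBy]
    split
    · simp [hk]
    · simp [ih]

-- DISTRIBUTION SORT: a stable sort by an Int key is the concatenation, over the sorted distinct
-- keys, of the original-order buckets of each key
theorem sorted_eq_flatMap_buckets {α : Type} (l : List α) (key : α → Int) :
    PySem.List.sorted l key
      = (PySem.List.sorted (PySem.Set.ofList (l.map key)) (fun v => v)).flatMap
          (fun L => l.filter (fun p => key p == L)) := by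
  induction l using List.reverseRecOn with
  | nil => simp [PySem.List.sorted]
  | append_singleton l x ih =>
    have hset : PySem.Set.ofList ((l ++ [x]).map key)
        = PySem.Set.add (PySem.Set.ofList (l.map key)) (key x) := by
      simp [PySem.Set.ofList_eq_foldl, List.foldl_append]
    have hpair : (PySem.List.sorted (PySem.Set.ofList ((l ++ [x]).map key)) (fun v => v)).Pairwise (· < ·) := by
      simpa using PySem.List.sorted_ofList_pairwise_lt ((l ++ [x]).map key)
    have hmemx : key x ∈ PySem.List.sorted (PySem.Set.ofList ((l ++ [x]).map key)) (fun v => v) := by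
      rw [PySem.List.mem_sorted, PySem.Set.mem_ofList]
      simp
    have hbuck : ∀ L : Int, ∀ p ∈ l.filter (fun p => key p == L), key p = L := by
      intro L p hp
      simpa using (List.mem_filter.mp hp).2
    rw [sorted_append_singleton, ih]
    have hLs : (PySem.List.sorted (PySem.Set.ofList (l.map key)) (fun v => v)).flatMap
          (fun L => l.filter (fun p => key p == L))
        = (PySem.List.sorted (PySem.Set.ofList ((l ++ [x]).map key)) (fun v => v)).flatMap
          (fun L => l.filter (fun p => key p == L)) := by
      rw [hset]
      by_cases hmem : key x ∈ PySem.Set.ofList (l.map key)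
      · rw [PySem.Set.add, if_pos]
        simpa [PySem.Set.contains] using hmem
      · rw [PySem.Set.add, if_neg (by simpa [PySem.Set.contains] using hmem)]
        rw [sorted_append_singleton]
        rw [flatMap_insertBy_of_empty _ _ _ _ (by
          apply List.filter_eq_nil_iff.mpr
          intro p hp hc
          exact hmem (by rw [PySem.Set.mem_ofList]; exact List.mem_map.mpr ⟨p, hp, by simpa using hc⟩))]
    rw [hLs, insertBy_into_buckets key x _ _ hpair hmemx hbuck]
    apply List.flatMap_congr
    intro L hL
    by_cases h : key x = L <;> simp [List.filter_append, h]

theorem slice_to_map {α β : Type} (g : α → β) (l : List α) (b : Int) :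
    PySem.List.slice (l.map g) none (some b) = (PySem.List.slice l none (some b)).map g := by
  simp [PySem.List.slice, List.map_take]

theorem insertBy_map {α β : Type} (b : β → β → Bool) (f : α → β) (x : α) (l : List α) :
    PySem.List.insertBy b (f x) (l.map f) = (PySem.List.insertBy (fun a c => b (f a) (f c)) x l).map f := by
  induction l with
  | nil => rfl
  | cons y ys ih =>
    simp only [List.map_cons, PySem.List.insertBy]
    split
    · rfl
    · simp [ih]

-- sorting a mapped list with key k is mapping the sort with key k ∘ f
theorem sorted_map {α β κ : Type} [LT κ] [DecidableLT κ] (f : α → β) (l : List α) (key : β → κ) :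
    PySem.List.sorted (l.map f) key = (PySem.List.sorted l (fun a => key (f a))).map f := by
  rw [PySem.List.sorted_eq_foldl_insertBy, PySem.List.sorted_eq_foldl_insertBy]
  suffices h : ∀ (acc : List α),
      (l.map f).foldl (fun acc x => PySem.List.insertBy (fun a b => decide (key a < key b)) x acc) (acc.map f)
      = (l.foldl (fun acc x => PySem.List.insertBy (fun a b => decide (key (f a) < key (f b))) x acc) acc).map f by
    simpa using h []
  induction l with
  | nil => intro acc; rfl
  | cons y ys ih =>
    intro acc
    simp only [List.map_cons, List.foldl_cons, insertBy_map]
    exact ih _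

-- the dict built by the grouping loop: its buckets and its keys
theorem group_dict_getD {α : Type} (l : List α) (key : α → Int) (L : Int) :
    (l.foldl (fun d p => d.modify (key p) [] (· ++ [p])) PySem.Dict.empty).getD L []
      = l.filter (fun p => key p == L) := by
  have hmap : l.foldl (fun d p => d.modify (key p) [] (· ++ [p])) PySem.Dict.empty
      = (l.map (fun p => (key p, p))).foldl (fun d pr => d.modify pr.1 [] (· ++ [pr.2])) PySem.Dict.empty := by
    rw [List.foldl_map]
  rw [hmap, PySem.Dict.getD_foldl_modify_append]
  simp [List.filter_map, List.map_map, Function.comp_def]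

theorem group_dict_keys {α : Type} (l : List α) (key : α → Int) :
    (l.foldl (fun d p => d.modify (key p) [] (· ++ [p])) PySem.Dict.empty).keys
      = PySem.Set.ofList (l.map key) := by
  rw [PySem.Dict.keys_foldl_modify_key]
  simp [PySem.Set.update, PySem.Set.ofList_eq_foldl]

-- the two halves of the equivalence, stated over the lowered query q
theorem suggest_paths_core (tree_paths : List String) (q : String) (limit : Int) :
    (PySem.List.slice
      (PySem.List.sorted2
        (tree_paths.foldl (fun scored p =>
          let pl := PySem.Str.lower p
          if PySem.Str.isIn q pl then
            scored ++ [(((if PySem.Str.endswith pl q then (0 : Int) else 1), (PySem.Str.len pl : Int)), p)]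
          else scored) [])
        (fun x => x.1.1) (fun x => x.1.2))
      none (some limit)).map (fun x => x.2)
    =
    (let byLen : PySem.Dict Int (List String) × PySem.Dict Int (List String) :=
      tree_paths.foldl (fun acc p =>
        let pl := PySem.Str.lower p
        if PySem.Str.isIn q pl then
          if PySem.Str.endswith pl q then
            (acc.1.modify (PySem.Str.len pl : Int) [] (· ++ [p]), acc.2)
          else
            (acc.1, acc.2.modify (PySem.Str.len pl : Int) [] (· ++ [p]))
        else acc) (PySem.Dict.empty, PySem.Dict.empty)
     let out := (PySem.List.sorted byLen.1.keys (fun v => v)).foldl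
        (fun out L => out ++ byLen.1.getD L []) []
     let out := (PySem.List.sorted byLen.2.keys (fun v => v)).foldl
        (fun out L => out ++ byLen.2.getD L []) out
     PySem.List.slice out none (some limit)) := by
  have hA : tree_paths.foldl (fun scored p =>
        let pl := PySem.Str.lower p
        if PySem.Str.isIn q pl then
          scored ++ [(((if PySem.Str.endswith pl q then (0 : Int) else 1), (PySem.Str.len pl : Int)), p)]
        else scored) []
      = (tree_paths.filter (fun p => PySem.Str.isIn q (PySem.Str.lower p))).map
          (fun p => (((if PySem.Str.endswith (PySem.Str.lower p) q then (0 : Int) else 1),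
                      (PySem.Str.len (PySem.Str.lower p) : Int)), p)) := by
    simpa using PySem.List.foldl_append_if
      (fun p => PySem.Str.isIn q (PySem.Str.lower p))
      (fun p => (((if PySem.Str.endswith (PySem.Str.lower p) q then (0 : Int) else 1),
                  (PySem.Str.len (PySem.Str.lower p) : Int)), p))
      tree_paths []
  have hstep : (fun (acc : PySem.Dict Int (List String) × PySem.Dict Int (List String)) p =>
        let pl := PySem.Str.lower p
        if PySem.Str.isIn q pl then
          if PySem.Str.endswith pl q then
            (acc.1.modify (PySem.Str.len pl : Int) [] (· ++ [p]), acc.2)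
          else
            (acc.1, acc.2.modify (PySem.Str.len pl : Int) [] (· ++ [p]))
        else acc)
      = (fun acc p =>
          ((fun d p => if PySem.Str.isIn q (PySem.Str.lower p) && PySem.Str.endswith (PySem.Str.lower p) q
              then PySem.Dict.modify d (PySem.Str.len (PySem.Str.lower p) : Int) [] (· ++ [p]) else d) acc.1 p,
           (fun d p => if PySem.Str.isIn q (PySem.Str.lower p) && !PySem.Str.endswith (PySem.Str.lower p) q
              then PySem.Dict.modify d (PySem.Str.len (PySem.Str.lower p) : Int) [] (· ++ [p]) else d) acc.2 p)) := by
    funext acc p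
    by_cases h1 : PySem.Chars.isIn q.toList (PySem.Chars.lower p.toList) <;>
      by_cases h2 : PySem.Chars.endswith (PySem.Chars.lower p.toList) q.toList <;> simp [h1, h2]
  have hB : tree_paths.foldl (fun (acc : PySem.Dict Int (List String) × PySem.Dict Int (List String)) p =>
        let pl := PySem.Str.lower p
        if PySem.Str.isIn q pl then
          if PySem.Str.endswith pl q then
            (acc.1.modify (PySem.Str.len pl : Int) [] (· ++ [p]), acc.2)
          else
            (acc.1, acc.2.modify (PySem.Str.len pl : Int) [] (· ++ [p]))
        else acc) (PySem.Dict.empty, PySem.Dict.empty)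
      = ((((tree_paths.filter (fun p => PySem.Str.isIn q (PySem.Str.lower p))).filter
             (fun p => PySem.Str.endswith (PySem.Str.lower p) q)).foldl
            (fun d p => d.modify (PySem.Str.len (PySem.Str.lower p) : Int) [] (· ++ [p])) PySem.Dict.empty),
         (((tree_paths.filter (fun p => PySem.Str.isIn q (PySem.Str.lower p))).filter
             (fun p => !PySem.Str.endswith (PySem.Str.lower p) q)).foldl
            (fun d p => d.modify (PySem.Str.len (PySem.Str.lower p) : Int) [] (· ++ [p])) PySem.Dict.empty)) := by
    rw [hstep, PySem.List.foldl_prod_mk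
      (f := fun d p => if PySem.Str.isIn q (PySem.Str.lower p) && PySem.Str.endswith (PySem.Str.lower p) q
              then PySem.Dict.modify d (PySem.Str.len (PySem.Str.lower p) : Int) [] (· ++ [p]) else d)
      (g := fun d p => if PySem.Str.isIn q (PySem.Str.lower p) && !PySem.Str.endswith (PySem.Str.lower p) q
              then PySem.Dict.modify d (PySem.Str.len (PySem.Str.lower p) : Int) [] (· ++ [p]) else d)]
    rw [PySem.List.foldl_if_eq_foldl_filter, PySem.List.foldl_if_eq_foldl_filter]
    rw [List.filter_filter, List.filter_filter]
    simp [Bool.and_comm]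
  simp only [hA, hB]
  rw [sorted2_bucket _ _ _ (by
    intro x hx
    rcases List.mem_map.mp hx with ⟨p, _, rfl⟩
    by_cases h : PySem.Chars.endswith (PySem.Chars.lower p.toList) q.toList <;> simp [h])]
  rw [List.filter_map, List.filter_map]
  have hc0 : ((fun x : (Int × Int) × String => x.1.1 == 0) ∘
        (fun p => (((if PySem.Str.endswith (PySem.Str.lower p) q then (0 : Int) else 1),
                    (PySem.Str.len (PySem.Str.lower p) : Int)), p)))
      = fun p => PySem.Str.endswith (PySem.Str.lower p) q := by
    funext p; by_cases h : PySem.Chars.endswith (PySem.Chars.lower p.toList) q.toList <;> simp [h]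
  have hc1 : ((fun x : (Int × Int) × String => !(x.1.1 == 0)) ∘
        (fun p => (((if PySem.Str.endswith (PySem.Str.lower p) q then (0 : Int) else 1),
                    (PySem.Str.len (PySem.Str.lower p) : Int)), p)))
      = fun p => !PySem.Str.endswith (PySem.Str.lower p) q := by
    funext p; by_cases h : PySem.Chars.endswith (PySem.Chars.lower p.toList) q.toList <;> simp [h]
  rw [hc0, hc1, sorted_map, sorted_map, ← List.map_append, slice_to_map]
  simp only [group_dict_keys, group_dict_getD, PySem.List.foldl_append_eq_flatMap,
    List.nil_append]
  rw [← sorted_eq_flatMap_buckets, ← sorted_eq_flatMap_buckets]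
  simp [List.map_map, Function.comp_def]

theorem suggest_paths_spec : Claim_equal_suggest_paths := by
  intro tree_paths query limit _
  unfold Spec_suggest_paths suggest_paths suggest_paths_alt
  exact suggest_paths_core tree_paths (PySem.Str.lower query) limit
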